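-- pv_equiv track=rewrite | github.com/GaurisankarJ/research | scripts/evaluation/autoresearch_prompt_base/ablation_helper.py | exact_sequence_reason
-- ===== SOURCE A (Python) =====
-- def exact_sequence_reason(block_types: list[str], stray_text: bool) -> tuple[bool, str]:
--     if stray_text:
--         return False, "text_outside_tags"
--     if not block_types:
--         return False, "no_blocks"
--     if block_types[0] != "think":
--         return False, "not_start_with_think"
--     if block_types[-1] != "answer":
--         return False, "not_end_with_answer"
--     if len(block_types) < 5:
--         if block_types == ["think", "tool_call", "tool_response", "answer"]:
--             return False, "missing_post_tool_think"
--         return False, "missing_required_tool_turn"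
--
--     idx = 1
--     tool_turns = 0
--     while idx < len(block_types) - 1:
--         if idx + 2 >= len(block_types):
--             return False, "truncated_before_answer"
--         chunk = block_types[idx : idx + 3]
--         if chunk == ["tool_call", "tool_response", "answer"]:
--             return False, "missing_post_tool_think"
--         if chunk != ["tool_call", "tool_response", "think"]:
--             return False, "bad_block_order"
--         tool_turns += 1
--         idx += 3
--
--     if idx != len(block_types) - 1:
--         return False, "bad_block_order"
--     if tool_turns < 1:
--         return False, "missing_required_tool_turn"
--     return True, "exact_required_sequence"
-- ===== SOURCE B (Python) =====
-- # B: pattern-matching consumer of tool turns over the list structure, no index/slice-of-three bookkeeping.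
--
-- def _scan(rest, turns):
--     while True:
--         match rest:
--             case [] | [_]:
--                 if turns < 1:
--                     return False, "missing_required_tool_turn"
--                 return True, "exact_required_sequence"
--             case [_, _]:
--                 return False, "truncated_before_answer"
--             case ["tool_call", "tool_response", "answer", *_]:
--                 return False, "missing_post_tool_think"
--             case ["tool_call", "tool_response", "think", *rest]:
--                 turns += 1
--             case _:
--                 return False, "bad_block_order"
--
--
-- def exact_sequence_reason(block_types: list[str], stray_text: bool) -> tuple[bool, str]:
--     if stray_text:
--         return False, "text_outside_tags"
--     if not block_types:
--         return False, "no_blocks"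
--     if block_types[0] != "think":
--         return False, "not_start_with_think"
--     if block_types[-1] != "answer":
--         return False, "not_end_with_answer"
--     if len(block_types) < 5:
--         if block_types == ["think", "tool_call", "tool_response", "answer"]:
--             return False, "missing_post_tool_think"
--         return False, "missing_required_tool_turn"
--     return _scan(block_types[1:], 0)
-- ===== Notes on version B (the rewrite author's own statement) =====
-- stated objective: alternative
-- what changed: Replaces A's index-based while loop that slices out three elements per step by a recursive pattern-matching scan that consumes tool turns directly from the list structure (structural recursion, no indices or slices).
import Mathlib
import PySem

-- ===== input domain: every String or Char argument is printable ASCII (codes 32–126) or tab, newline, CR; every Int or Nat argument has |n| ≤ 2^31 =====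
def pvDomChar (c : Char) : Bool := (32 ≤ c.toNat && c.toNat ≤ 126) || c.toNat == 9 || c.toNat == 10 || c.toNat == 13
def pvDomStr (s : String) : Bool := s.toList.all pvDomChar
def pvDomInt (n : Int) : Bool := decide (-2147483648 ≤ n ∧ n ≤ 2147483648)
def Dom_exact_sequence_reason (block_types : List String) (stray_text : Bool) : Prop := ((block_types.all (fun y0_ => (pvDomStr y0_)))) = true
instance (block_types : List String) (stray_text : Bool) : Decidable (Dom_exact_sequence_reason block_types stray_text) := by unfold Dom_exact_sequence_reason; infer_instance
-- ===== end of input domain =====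

-- B consumes the interior with a recursive pattern-matching scan over the list structure
-- instead of A's index/slice-of-three while loop (objective: alternative decomposition).

-- ===== PORT A =====
-- A's while loop: idx steps by 3, comparing the 3-slice against the two literal triples.
def esrLoop (block_types : List String) (idx tool_turns : Nat) : Bool × String :=
  if h : idx < block_types.length - 1 then
    if idx + 2 ≥ block_types.length then (false, "truncated_before_answer")
    else
      let chunk := PySem.List.slice block_types (some (idx : Int)) (some ((idx : Int) + 3))
      if chunk = ["tool_call", "tool_response", "answer"] then (false, "missing_post_tool_think")
      else if chunk ≠ ["tool_call", "tool_response", "think"] then (false, "bad_block_order")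
      else esrLoop block_types (idx + 3) (tool_turns + 1)
  else if idx ≠ block_types.length - 1 then (false, "bad_block_order")
  else if tool_turns < 1 then (false, "missing_required_tool_turn")
  else (true, "exact_required_sequence")
termination_by block_types.length - idx
decreasing_by omega

def exact_sequence_reason (block_types : List String) (stray_text : Bool) : Bool × String :=
  if stray_text then (false, "text_outside_tags")
  else if block_types = [] then (false, "no_blocks")
  else if PySem.List.pyGetD block_types 0 "" ≠ "think" then (false, "not_start_with_think")
  else if PySem.List.pyGetD block_types (-1) "" ≠ "answer" then (false, "not_end_with_answer")
  else if block_types.length < 5 then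
    if block_types = ["think", "tool_call", "tool_response", "answer"] then
      (false, "missing_post_tool_think")
    else (false, "missing_required_tool_turn")
  else esrLoop block_types 1 0

-- ===== PORT B =====
-- Source B's _scan: structural recursion, the match cases in order
def esrScan : List String → Nat → Bool × String
  | [], turns =>
    if turns < 1 then (false, "missing_required_tool_turn") else (true, "exact_required_sequence")
  | [_], turns =>
    if turns < 1 then (false, "missing_required_tool_turn") else (true, "exact_required_sequence")
  | [_, _], _ => (false, "truncated_before_answer")
  | a :: b :: c :: tail, turns =>
    if a = "tool_call" ∧ b = "tool_response" ∧ c = "answer" then (false, "missing_post_tool_think")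
    else if a = "tool_call" ∧ b = "tool_response" ∧ c = "think" then esrScan tail (turns + 1)
    else (false, "bad_block_order")

def exact_sequence_reason_alt (block_types : List String) (stray_text : Bool) : Bool × String :=
  if stray_text then (false, "text_outside_tags")
  else if block_types = [] then (false, "no_blocks")
  else if PySem.List.pyGetD block_types 0 "" ≠ "think" then (false, "not_start_with_think")
  else if PySem.List.pyGetD block_types (-1) "" ≠ "answer" then (false, "not_end_with_answer")
  else if block_types.length < 5 then
    if block_types = ["think", "tool_call", "tool_response", "answer"] then
      (false, "missing_post_tool_think")
    else (false, "missing_required_tool_turn")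
  else esrScan (PySem.List.slice block_types (some 1) none) 0

-- ===== PRECONDITION & SPEC =====
def Spec_exact_sequence_reason (block_types : List String) (stray_text : Bool) (out : Bool × String) : Prop := out = exact_sequence_reason_alt block_types stray_text
instance (block_types : List String) (stray_text : Bool) (out : Bool × String) : Decidable (Spec_exact_sequence_reason block_types stray_text out) := by unfold Spec_exact_sequence_reason; infer_instance

-- ===== CLAIM (what is proved, stated in full; the proofs are below) =====
def Claim_equal_exact_sequence_reason : Prop := ∀ (block_types : List String) (stray_text : Bool), Dom_exact_sequence_reason block_types stray_text → Spec_exact_sequence_reason block_types stray_text (exact_sequence_reason block_types stray_text)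

-- ===== LEMMAS AND PROOFS =====

theorem esrLoop_eq_scan (bt : List String)
    (hlast : bt[bt.length - 1]?.getD "" = "answer") :
    ∀ k idx turns, bt.length - idx ≤ k → 1 ≤ idx → idx ≤ bt.length - 1 →
      esrLoop bt idx turns = esrScan (bt.drop idx) turns := by
  intro k
  induction k with
  | zero => intro idx turns hk h1 hle; omega
  | succ k ih =>
    intro idx turns hk h1 hle
    have hn : 2 ≤ bt.length := by omega
    have hidx : idx < bt.length := by omega
    rw [esrLoop]
    by_cases h3 : idx + 2 < bt.length
    · -- at least three elements remain: a full chunk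
      have hd3 : bt.drop idx =
          bt[idx] :: bt[idx + 1] :: bt[idx + 2] :: bt.drop (idx + 3) := by
        rw [List.drop_eq_getElem_cons hidx,
          List.drop_eq_getElem_cons (by omega : idx + 1 < bt.length),
          List.drop_eq_getElem_cons (by omega : idx + 2 < bt.length)]
      have hchunk : PySem.List.slice bt (some (idx : Int)) (some ((idx : Int) + 3)) =
          [bt[idx], bt[idx + 1], bt[idx + 2]] := by
        have hcast : ((idx : Int) + 3) = ((idx + 3 : Nat) : Int) := by push_cast; ring
        rw [hcast, PySem.List.slice_natCast, (by omega : idx + 3 - idx = 3), hd3]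
        rfl
      rw [dif_pos (by omega), if_neg (by omega), hchunk, hd3]
      by_cases e1 : bt[idx] = "tool_call"
      · by_cases e2 : bt[idx + 1] = "tool_response"
        · by_cases e3 : bt[idx + 2] = "answer"
          · simp [esrScan, e1, e2, e3]
          · by_cases e4 : bt[idx + 2] = "think"
            · have hne : idx + 2 ≠ bt.length - 1 := by
                intro heq
                rw [← heq, List.getElem?_eq_getElem (by omega)] at hlast
                simp only [Option.getD_some] at hlast
                rw [hlast] at e4
                exact absurd e4 (by decide)
              have heq := ih (idx + 3) (turns + 1) (by omega) (by omega) (by omega)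
              simp [esrScan, e1, e2, e4, heq]
            · simp [esrScan, e1, e2, e3, e4]
        · simp [esrScan, e1, e2]
      · simp [esrScan, e1]
    · -- one or two elements remain
      by_cases h2 : idx = bt.length - 2
      · -- exactly two: truncated
        have hd2 : bt.drop idx = bt[idx] :: bt[idx + 1] :: [] := by
          rw [List.drop_eq_getElem_cons hidx,
            List.drop_eq_getElem_cons (by omega : idx + 1 < bt.length)]
          simp [List.drop_eq_nil_of_le (by omega : bt.length ≤ idx + 2)]
        rw [dif_pos (by omega), if_pos (by omega), hd2]
        rfl
      · -- exactly one element: idx = length - 1, the success check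
        have hd1 : bt.drop idx = bt[idx] :: [] := by
          rw [List.drop_eq_getElem_cons hidx]
          simp [List.drop_eq_nil_of_le (by omega : bt.length ≤ idx + 1)]
        rw [dif_neg (by omega), if_neg (by omega), hd1]
        rfl

-- ===== VERDICT (by name: the statement is the Claim_ definition above) =====
theorem exact_sequence_reason_spec : Claim_equal_exact_sequence_reason := by
  intro bt stray _dom
  unfold Spec_exact_sequence_reason exact_sequence_reason exact_sequence_reason_alt
  by_cases hs : stray = true
  · simp [hs]
  · rw [if_neg hs, if_neg hs]
    by_cases hnil : bt = []
    · rw [if_pos hnil, if_pos hnil]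
    · rw [if_neg hnil, if_neg hnil]
      by_cases h0 : PySem.List.pyGetD bt 0 "" ≠ "think"
      · rw [if_pos h0, if_pos h0]
      · rw [if_neg h0, if_neg h0]
        by_cases hl : PySem.List.pyGetD bt (-1) "" ≠ "answer"
        · rw [if_pos hl, if_pos hl]
        · rw [if_neg hl, if_neg hl]
          by_cases h5 : bt.length < 5
          · rw [if_pos h5, if_pos h5]
          · rw [if_neg h5, if_neg h5]
            have hlast : bt[bt.length - 1]?.getD "" = "answer" := by
              rw [not_not] at hl
              rw [List.getElem?_eq_getElem (by
                  have := List.length_pos_iff.mpr hnil; omega),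
                Option.getD_some, ← List.getLast_eq_getElem hnil,
                ← PySem.List.pyGetD_neg_one bt "" hnil]
              exact hl
            rw [PySem.List.slice_from_one, ← List.drop_one]
            exact esrLoop_eq_scan bt hlast (bt.length - 1) 1 0 (by omega) (by omega) (by omega)
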